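-- pv_equiv track=rewrite | github.com/charleschetty/learn-code | python/lunzi/2.py | jordan_kuai_pre
-- ===== SOURCE A (Python) =====
-- def jordan_kuai_pre(x_1=0,x_2=1,num_1=2,num_2=2,degree=3):
--     a=[]
--     for i in range(0,degree):
--         if i==x_1:
--             a.append(num_1)
--         elif i==x_2:
--             a.append(num_2)
--         else:
--             a.append(0)
--     return a
-- ===== SOURCE B (Python) =====
-- def jordan_kuai_pre(x_1=0, x_2=1, num_1=2, num_2=2, degree=3):
--     a = [0] * degree
--     if 0 <= x_2 < degree:
--         a[x_2] = num_2
--     if 0 <= x_1 < degree: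
--         a[x_1] = num_1
--     return a
-- ===== Notes on version B (the rewrite author's own statement) =====
-- stated objective: simpler
-- what changed: B allocates the whole zero list at once with [0]*degree and overwrites the two special positions (x_2 first so x_1 wins a tie, matching A's if/elif), instead of A's per-element scan with a three-way branch.
import Mathlib
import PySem

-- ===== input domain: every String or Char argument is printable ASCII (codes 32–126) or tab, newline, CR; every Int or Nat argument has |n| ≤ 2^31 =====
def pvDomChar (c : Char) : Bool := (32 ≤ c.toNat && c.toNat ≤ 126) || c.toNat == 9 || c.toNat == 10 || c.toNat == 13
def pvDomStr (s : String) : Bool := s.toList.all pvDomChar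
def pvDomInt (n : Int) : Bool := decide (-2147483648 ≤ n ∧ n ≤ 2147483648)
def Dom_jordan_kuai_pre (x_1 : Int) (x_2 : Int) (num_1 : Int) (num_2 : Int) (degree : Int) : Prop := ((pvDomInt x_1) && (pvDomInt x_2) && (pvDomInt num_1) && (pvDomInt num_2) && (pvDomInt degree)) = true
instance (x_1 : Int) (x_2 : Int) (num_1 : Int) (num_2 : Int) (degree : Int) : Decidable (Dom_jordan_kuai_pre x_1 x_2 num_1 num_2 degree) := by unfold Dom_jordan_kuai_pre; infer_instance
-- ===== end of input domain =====

-- ===== PORT A =====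
def jordan_kuai_pre (x_1 : Int) (x_2 : Int) (num_1 : Int) (num_2 : Int) (degree : Int) : List Int :=
  (PySem.List.pyRange 0 degree 1).foldl
    (fun a i => a ++ [if i = x_1 then num_1 else if i = x_2 then num_2 else 0]) []

-- ===== PORT B =====
-- B: build [0]*degree once, then patch the two positions (x_2 before x_1, so x_1 wins a tie).
def jordan_kuai_pre_alt (x_1 : Int) (x_2 : Int) (num_1 : Int) (num_2 : Int) (degree : Int) : List Int :=
  let a0 := List.replicate degree.toNat (0 : Int)
  let a1 := if 0 ≤ x_2 ∧ x_2 < degree then a0.set x_2.toNat num_2 else a0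
  if 0 ≤ x_1 ∧ x_1 < degree then a1.set x_1.toNat num_1 else a1

-- ===== PRECONDITION & SPEC =====
def Spec_jordan_kuai_pre (x_1 : Int) (x_2 : Int) (num_1 : Int) (num_2 : Int) (degree : Int) (out : List Int) : Prop := out = jordan_kuai_pre_alt x_1 x_2 num_1 num_2 degree
instance (x_1 : Int) (x_2 : Int) (num_1 : Int) (num_2 : Int) (degree : Int) (out : List Int) : Decidable (Spec_jordan_kuai_pre x_1 x_2 num_1 num_2 degree out) := by unfold Spec_jordan_kuai_pre; infer_instance

-- ===== CLAIM (what is proved, stated in full; the proofs are below) =====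
def Claim_equal_jordan_kuai_pre : Prop := ∀ (x_1 : Int) (x_2 : Int) (num_1 : Int) (num_2 : Int) (degree : Int), Dom_jordan_kuai_pre x_1 x_2 num_1 num_2 degree → Spec_jordan_kuai_pre x_1 x_2 num_1 num_2 degree (jordan_kuai_pre x_1 x_2 num_1 num_2 degree)

-- ===== LEMMAS AND PROOFS =====

-- ===== VERDICT (by name: the statement is the Claim_ definition above) =====
-- A's append-loop over range(0, degree) is a map over the range.
theorem foldl_append_singleton {α β : Type} (f : α → β) (l : List α) (init : List β) :
    l.foldl (fun a i => a ++ [f i]) init = init ++ l.map f := by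
  induction l generalizing init with
  | nil => simp
  | cons x xs ih => simp [List.foldl_cons, ih]

theorem jordan_kuai_pre_spec : Claim_equal_jordan_kuai_pre := by
  intro x_1 x_2 num_1 num_2 degree _
  unfold Spec_jordan_kuai_pre jordan_kuai_pre jordan_kuai_pre_alt
  rw [foldl_append_singleton, PySem.List.pyRange_one]
  simp only [List.nil_append, List.map_map]
  apply List.ext_getElem
  · -- lengths
    split_ifs <;> simp
  · intro j hj hj'
    have hjn : j < degree.toNat := by simpa using hj
    simp only [List.getElem_map, List.getElem_range, Function.comp]
    split_ifs with h1 h2 h2 <;>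
      simp only [List.getElem_set, List.getElem_replicate] <;>
      first
      | omega
      | (split_ifs <;> omega)
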